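-- pv_equiv track=rewrite | github.com/Starfox899/ubongo | ubongo.py | dihedral_orientations
-- ===== SOURCE A (Python) =====
-- from typing import FrozenSet, Tuple, List, Set, Optional, Dict, Iterable
--
-- Cell = Tuple[int, int]
--
-- def normalize(cells: FrozenSet[Cell]) -> FrozenSet[Cell]:
--     """Translate the set so min x,y becomes (0,0)."""
--     if not cells:
--         return cells
--     minx = min(x for x, _ in cells)
--     miny = min(y for _, y in cells)
--     return frozenset((x - minx, y - miny) for x, y in cells)
--
-- def bbox(cells: FrozenSet[Cell]) -> Tuple[int, int]:
--     """Return width, height of a tight bounding box around the cells."""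
--     if not cells:
--         return (0, 0)
--     maxx = max(x for x, _ in cells)
--     maxy = max(y for _, y in cells)
--     return (maxx + 1, maxy + 1)
--
-- def rotate90(cells: FrozenSet[Cell]) -> FrozenSet[Cell]:
--     """Rotate 90° CW within local bbox, then normalize."""
--     w, h = bbox(cells)
--     return normalize(frozenset((y, w - 1 - x) for (x, y) in cells))
--
-- def reflect_x(cells: FrozenSet[Cell]) -> FrozenSet[Cell]:
--     """Mirror across y-axis within local bbox, then normalize."""
--     w, h = bbox(cells)
--     return normalize(frozenset((w - 1 - x, y) for (x, y) in cells))
--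
-- def dihedral_orientations(cells: FrozenSet[Cell]) -> List[FrozenSet[Cell]]:
--     """Generate unique orientations under D4 (rotations + reflections)."""
--     variants = []
--     cur = normalize(cells)
--     for _ in range(4):
--         variants.append(cur)
--         variants.append(reflect_x(cur))
--         cur = rotate90(cur)
--     uniq: Dict[Tuple[Cell, ...], FrozenSet[Cell]] = {}
--     for v in variants:
--         key = tuple(sorted(v))
--         if key not in uniq:
--             uniq[key] = v
--     return list(uniq.values())
-- ===== SOURCE B (Python) =====
-- def dihedral_orientations(cells):
--     """Unique D4 orientations via 8 closed-form coordinate maps on the normalized cells."""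
--     mx, my = (min(x for x, _ in cells), min(y for _, y in cells)) if cells else (0, 0)
--     n = frozenset((x - mx, y - my) for x, y in cells)
--     w = max((x for x, _ in n), default=-1) + 1
--     h = max((y for _, y in n), default=-1) + 1
--     transforms = [
--         lambda x, y: (x, y),
--         lambda x, y: (w - 1 - x, y),
--         lambda x, y: (y, w - 1 - x),
--         lambda x, y: (h - 1 - y, w - 1 - x),
--         lambda x, y: (w - 1 - x, h - 1 - y),
--         lambda x, y: (x, h - 1 - y),
--         lambda x, y: (h - 1 - y, x),
--         lambda x, y: (y, x),
--     ]
--     uniq = {}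
--     for t in transforms:
--         v = frozenset(t(x, y) for x, y in n)
--         key = tuple(sorted(v))
--         if key not in uniq:
--             uniq[key] = v
--     return list(uniq.values())
-- ===== Notes on version B (the rewrite author's own statement) =====
-- stated objective: alternative
-- what changed: Replaces the iterated cur = rotate90(cur) loop (which re-computes a bounding box and re-normalizes at every step) with eight fixed closed-form coordinate maps derived once from the bounding box of the normalized cells, applied directly and fused with the dedup loop.
import Mathlib
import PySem

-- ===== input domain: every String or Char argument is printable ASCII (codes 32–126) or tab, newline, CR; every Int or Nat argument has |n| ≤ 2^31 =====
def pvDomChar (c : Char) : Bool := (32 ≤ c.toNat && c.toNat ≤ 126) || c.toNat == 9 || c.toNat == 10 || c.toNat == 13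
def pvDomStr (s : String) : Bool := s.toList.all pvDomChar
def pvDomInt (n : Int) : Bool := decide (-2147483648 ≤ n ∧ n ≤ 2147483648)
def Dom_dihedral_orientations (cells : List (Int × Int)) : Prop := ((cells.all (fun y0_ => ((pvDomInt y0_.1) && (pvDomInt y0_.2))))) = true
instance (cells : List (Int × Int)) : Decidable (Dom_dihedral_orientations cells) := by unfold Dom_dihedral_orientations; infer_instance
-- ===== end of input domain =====

-- B replaces A's iterated rotate-and-renormalize loop by eight closed-form coordinate maps
-- applied once to the normalized cells (objective: alternative decomposition, same cost).

-- ===== PORT A =====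
-- normalize(cells); the .getD 0 on min? is only reached when the guard ensures nonemptiness
def pvNormalize (cells : PySem.Set (Int × Int)) : PySem.Set (Int × Int) :=
  if cells = [] then cells
  else
    let minx : Int := (PySem.List.min? (cells.map (fun p => p.1)) (fun x => x)).getD 0
    let miny : Int := (PySem.List.min? (cells.map (fun p => p.2)) (fun x => x)).getD 0
    PySem.Set.ofList (cells.map (fun p => (p.1 - minx, p.2 - miny)))

def pvBbox (cells : PySem.Set (Int × Int)) : Int × Int :=
  if cells = [] then (0, 0)
  else
    let maxx : Int := (PySem.List.max? (cells.map (fun p => p.1)) (fun x => x)).getD 0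
    let maxy : Int := (PySem.List.max? (cells.map (fun p => p.2)) (fun x => x)).getD 0
    (maxx + 1, maxy + 1)

def pvRotate90 (cells : PySem.Set (Int × Int)) : PySem.Set (Int × Int) :=
  let wh := pvBbox cells
  pvNormalize (PySem.Set.ofList (cells.map (fun p => (p.2, wh.1 - 1 - p.1))))

def pvReflectX (cells : PySem.Set (Int × Int)) : PySem.Set (Int × Int) :=
  let wh := pvBbox cells
  pvNormalize (PySem.Set.ofList (cells.map (fun p => (wh.1 - 1 - p.1, p.2))))

-- dedup step shared verbatim by both Pythons: dict keyed on tuple(sorted(v)), first seen wins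
def pvUniqStep (d : PySem.Dict (List (Int × Int)) (List (Int × Int))) (v : List (Int × Int)) :
    PySem.Dict (List (Int × Int)) (List (Int × Int)) :=
  let key := PySem.List.sorted2 v (fun p => p.1) (fun p => p.2)
  if ¬ (d.contains key = true) then d.insert key v else d

def dihedral_orientations (cells : List (Int × Int)) : List (List (Int × Int)) :=
  let s : PySem.Set (Int × Int) := PySem.Set.ofList cells   -- the frozenset argument
  let st := (List.range 4).foldl
    (fun (st : List (PySem.Set (Int × Int)) × PySem.Set (Int × Int)) _ =>
      (st.1 ++ [st.2, pvReflectX st.2], pvRotate90 st.2))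
    ([], pvNormalize s)
  let variants := st.1
  let uniq := variants.foldl pvUniqStep PySem.Dict.empty
  PySem.Dict.values uniq

-- ===== PORT B =====
def dihedral_orientations_alt (cells : List (Int × Int)) : List (List (Int × Int)) :=
  let s : PySem.Set (Int × Int) := PySem.Set.ofList cells   -- the frozenset argument
  let m : Int × Int :=
    if s = [] then (0, 0)
    else ((PySem.List.min? (s.map (fun p => p.1)) (fun x => x)).getD 0,
          (PySem.List.min? (s.map (fun p => p.2)) (fun x => x)).getD 0)
  let n : PySem.Set (Int × Int) := PySem.Set.ofList (s.map (fun p => (p.1 - m.1, p.2 - m.2)))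
  let w : Int := (PySem.List.max? (n.map (fun p => p.1)) (fun x => x)).getD (-1) + 1
  let h : Int := (PySem.List.max? (n.map (fun p => p.2)) (fun x => x)).getD (-1) + 1
  let ts : List ((Int × Int) → Int × Int) :=
    [ fun p => (p.1, p.2),
      fun p => (w - 1 - p.1, p.2),
      fun p => (p.2, w - 1 - p.1),
      fun p => (h - 1 - p.2, w - 1 - p.1),
      fun p => (w - 1 - p.1, h - 1 - p.2),
      fun p => (p.1, h - 1 - p.2),
      fun p => (h - 1 - p.2, p.1),
      fun p => (p.2, p.1) ]
  let uniq := ts.foldl (fun d t => pvUniqStep d (PySem.Set.ofList (n.map t))) PySem.Dict.empty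
  PySem.Dict.values uniq

-- ===== PRECONDITION & SPEC =====
def Spec_dihedral_orientations (cells : List (Int × Int)) (out : List (List (Int × Int))) : Prop := out = dihedral_orientations_alt cells
instance (cells : List (Int × Int)) (out : List (List (Int × Int))) : Decidable (Spec_dihedral_orientations cells out) := by unfold Spec_dihedral_orientations; infer_instance

-- ===== CLAIM (what is proved, stated in full; the proofs are below) =====
def Claim_equal_dihedral_orientations : Prop := ∀ (cells : List (Int × Int)), Dom_dihedral_orientations cells → Spec_dihedral_orientations cells (dihedral_orientations cells)

-- ===== LEMMAS AND PROOFS =====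

-- n is a nodup, nonempty normalized shape fitting tightly in a w × h box
def pvNF (n : List (Int × Int)) (w h : Int) : Prop :=
  n ≠ [] ∧ n.Nodup ∧
  (∀ p ∈ n, 0 ≤ p.1 ∧ p.1 ≤ w - 1 ∧ 0 ≤ p.2 ∧ p.2 ≤ h - 1) ∧
  (∃ p ∈ n, p.1 = 0) ∧ (∃ p ∈ n, p.2 = 0) ∧ (∃ p ∈ n, p.1 = w - 1) ∧ (∃ p ∈ n, p.2 = h - 1)

theorem pv_extrema_min (l : List Int) (d : Int) (hne : l ≠ []) :
    (∀ x ∈ l, (PySem.List.min? l (fun x => x)).getD d ≤ x) ∧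
      ((PySem.List.min? l (fun x => x)).getD d) ∈ l := by
  cases h : PySem.List.min? l (fun x => x) with
  | none => exact absurd ((PySem.List.min?_eq_none_iff l (fun x => x)).mp h) hne
  | some v =>
    refine ⟨fun x hx => ?_, ?_⟩
    · simpa using PySem.List.min?_isMin h x hx
    · simpa using PySem.List.min?_mem h

theorem pv_extrema_max (l : List Int) (d : Int) (hne : l ≠ []) :
    (∀ x ∈ l, x ≤ (PySem.List.max? l (fun x => x)).getD d) ∧
      ((PySem.List.max? l (fun x => x)).getD d) ∈ l := by
  cases h : PySem.List.max? l (fun x => x) with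
  | none => exact absurd ((PySem.List.max?_eq_none_iff l (fun x => x)).mp h) hne
  | some v =>
    refine ⟨fun x hx => ?_, ?_⟩
    · simpa using PySem.List.max?_isMax h x hx
    · simpa using PySem.List.max?_mem h

theorem pv_min_getD (l : List Int) (m d : Int) (hm : m ∈ l) (hall : ∀ x ∈ l, m ≤ x) :
    (PySem.List.min? l (fun x => x)).getD d = m := by
  have hne : l ≠ [] := by rintro rfl; simp at hm
  obtain ⟨h1, h2⟩ := pv_extrema_min l d hne
  exact le_antisymm (h1 m hm) (hall _ h2)

theorem pv_max_getD (l : List Int) (m d : Int) (hm : m ∈ l) (hall : ∀ x ∈ l, x ≤ m) :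
    (PySem.List.max? l (fun x => x)).getD d = m := by
  have hne : l ≠ [] := by rintro rfl; simp at hm
  obtain ⟨h1, h2⟩ := pv_extrema_max l d hne
  exact le_antisymm (hall _ h2) (h1 m hm)

theorem pvBbox_eq (n : List (Int × Int)) (w h : Int) (hn : pvNF n w h) :
    pvBbox n = (w, h) := by
  obtain ⟨hne, hnd, hb, hx0, hy0, hxw, hyh⟩ := hn
  unfold pvBbox
  rw [if_neg hne]
  have h1 : (PySem.List.max? (n.map (fun p => p.1)) (fun x => x)).getD 0 = w - 1 := by
    refine pv_max_getD _ _ _ ?_ ?_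
    · obtain ⟨p, hp, he⟩ := hxw; exact List.mem_map.mpr ⟨p, hp, he⟩
    · intro x hx; obtain ⟨p, hp, rfl⟩ := List.mem_map.mp hx; exact (hb p hp).2.1
  have h2 : (PySem.List.max? (n.map (fun p => p.2)) (fun x => x)).getD 0 = h - 1 := by
    refine pv_max_getD _ _ _ ?_ ?_
    · obtain ⟨p, hp, he⟩ := hyh; exact List.mem_map.mpr ⟨p, hp, he⟩
    · intro x hx; obtain ⟨p, hp, rfl⟩ := List.mem_map.mp hx; exact (hb p hp).2.2.2
  simp only [h1, h2, Prod.mk.injEq]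
  omega

theorem pvNormalize_of_NF (n : List (Int × Int)) (w h : Int) (hn : pvNF n w h) :
    pvNormalize n = n := by
  obtain ⟨hne, hnd, hb, hx0, hy0, hxw, hyh⟩ := hn
  unfold pvNormalize
  rw [if_neg hne]
  have h1 : (PySem.List.min? (n.map (fun p => p.1)) (fun x => x)).getD 0 = 0 := by
    refine pv_min_getD _ _ _ ?_ ?_
    · obtain ⟨p, hp, he⟩ := hx0; exact List.mem_map.mpr ⟨p, hp, he⟩
    · intro x hx; obtain ⟨p, hp, rfl⟩ := List.mem_map.mp hx; exact (hb p hp).1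
  have h2 : (PySem.List.min? (n.map (fun p => p.2)) (fun x => x)).getD 0 = 0 := by
    refine pv_min_getD _ _ _ ?_ ?_
    · obtain ⟨p, hp, he⟩ := hy0; exact List.mem_map.mpr ⟨p, hp, he⟩
    · intro x hx; obtain ⟨p, hp, rfl⟩ := List.mem_map.mp hx; exact (hb p hp).2.2.1
  simp only [h1, h2, sub_zero]
  have : n.map (fun p => ((p.1, p.2) : Int × Int)) = n := by
    simp
  rw [this]
  exact PySem.Set.ofList_eq_self_of_nodup _ hnd

theorem pvNF_map (n : List (Int × Int)) (w' h' : Int) (f : (Int × Int) → (Int × Int))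
    (hne : n ≠ []) (hnd : n.Nodup) (hinj : Function.Injective f)
    (hb : ∀ p ∈ n, 0 ≤ (f p).1 ∧ (f p).1 ≤ w' - 1 ∧ 0 ≤ (f p).2 ∧ (f p).2 ≤ h' - 1)
    (e1 : ∃ p ∈ n, (f p).1 = 0) (e2 : ∃ p ∈ n, (f p).2 = 0)
    (e3 : ∃ p ∈ n, (f p).1 = w' - 1) (e4 : ∃ p ∈ n, (f p).2 = h' - 1) :
    pvNF (n.map f) w' h' := by
  refine ⟨by simpa using hne, hnd.map hinj, ?_, ?_, ?_, ?_, ?_⟩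
  · intro p hp; obtain ⟨q, hq, rfl⟩ := List.mem_map.mp hp; exact hb q hq
  · obtain ⟨p, hp, he⟩ := e1; exact ⟨f p, List.mem_map.mpr ⟨p, hp, rfl⟩, he⟩
  · obtain ⟨p, hp, he⟩ := e2; exact ⟨f p, List.mem_map.mpr ⟨p, hp, rfl⟩, he⟩
  · obtain ⟨p, hp, he⟩ := e3; exact ⟨f p, List.mem_map.mpr ⟨p, hp, rfl⟩, he⟩
  · obtain ⟨p, hp, he⟩ := e4; exact ⟨f p, List.mem_map.mpr ⟨p, hp, rfl⟩, he⟩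

theorem pvRot_inj (w : Int) : Function.Injective (fun p : Int × Int => (p.2, w - 1 - p.1)) := by
  rintro ⟨x1, y1⟩ ⟨x2, y2⟩ hpq
  simp only [Prod.mk.injEq] at hpq ⊢
  omega

theorem pvRefl_inj (w : Int) : Function.Injective (fun p : Int × Int => (w - 1 - p.1, p.2)) := by
  rintro ⟨x1, y1⟩ ⟨x2, y2⟩ hpq
  simp only [Prod.mk.injEq] at hpq ⊢
  omega

theorem pvRotNF (n : List (Int × Int)) (w h : Int) (hn : pvNF n w h) :
    pvNF (n.map (fun p => (p.2, w - 1 - p.1))) h w := by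
  obtain ⟨hne, hnd, hb, hx0, hy0, hxw, hyh⟩ := hn
  refine pvNF_map n h w _ hne hnd (pvRot_inj w) ?_ ?_ ?_ ?_ ?_
  · intro p hp; have := hb p hp; dsimp only; omega
  · obtain ⟨p, hp, he⟩ := hy0; exact ⟨p, hp, he⟩
  · obtain ⟨p, hp, he⟩ := hxw; exact ⟨p, hp, by dsimp only; omega⟩
  · obtain ⟨p, hp, he⟩ := hyh; exact ⟨p, hp, he⟩
  · obtain ⟨p, hp, he⟩ := hx0; exact ⟨p, hp, by dsimp only; omega⟩

theorem pvReflNF (n : List (Int × Int)) (w h : Int) (hn : pvNF n w h) :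
    pvNF (n.map (fun p => (w - 1 - p.1, p.2))) w h := by
  obtain ⟨hne, hnd, hb, hx0, hy0, hxw, hyh⟩ := hn
  refine pvNF_map n w h _ hne hnd (pvRefl_inj w) ?_ ?_ ?_ ?_ ?_
  · intro p hp; have := hb p hp; dsimp only; omega
  · obtain ⟨p, hp, he⟩ := hxw; exact ⟨p, hp, by dsimp only; omega⟩
  · obtain ⟨p, hp, he⟩ := hy0; exact ⟨p, hp, he⟩
  · obtain ⟨p, hp, he⟩ := hx0; exact ⟨p, hp, by dsimp only; omega⟩
  · obtain ⟨p, hp, he⟩ := hyh; exact ⟨p, hp, he⟩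

theorem pvRotate90_of_NF (n : List (Int × Int)) (w h : Int) (hn : pvNF n w h) :
    pvRotate90 n = n.map (fun p => (p.2, w - 1 - p.1)) := by
  have hbb := pvBbox_eq n w h hn
  have hnd := hn.2.1
  unfold pvRotate90
  rw [hbb]
  show pvNormalize (PySem.Set.ofList (n.map (fun p => (p.2, w - 1 - p.1)))) = _
  rw [PySem.Set.ofList_eq_self_of_nodup _ (hnd.map (pvRot_inj w))]
  exact pvNormalize_of_NF _ h w (pvRotNF n w h hn)

theorem pvReflectX_of_NF (n : List (Int × Int)) (w h : Int) (hn : pvNF n w h) :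
    pvReflectX n = n.map (fun p => (w - 1 - p.1, p.2)) := by
  have hbb := pvBbox_eq n w h hn
  have hnd := hn.2.1
  unfold pvReflectX
  rw [hbb]
  show pvNormalize (PySem.Set.ofList (n.map (fun p => (w - 1 - p.1, p.2)))) = _
  rw [PySem.Set.ofList_eq_self_of_nodup _ (hnd.map (pvRefl_inj w))]
  exact pvNormalize_of_NF _ w h (pvReflNF n w h hn)

theorem pvNormalize_NF (s : List (Int × Int)) (hne : s ≠ []) (hnd : s.Nodup) :
    pvNF (pvNormalize s)
      ((PySem.List.max? ((pvNormalize s).map (fun p => p.1)) (fun x => x)).getD (-1) + 1)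
      ((PySem.List.max? ((pvNormalize s).map (fun p => p.2)) (fun x => x)).getD (-1) + 1) := by
  obtain ⟨hmx_le, hmx_mem⟩ :=
    pv_extrema_min (s.map (fun p => p.1)) 0 (by intro hx; exact hne (List.map_eq_nil_iff.mp hx))
  obtain ⟨hmy_le, hmy_mem⟩ :=
    pv_extrema_min (s.map (fun p => p.2)) 0 (by intro hx; exact hne (List.map_eq_nil_iff.mp hx))
  have finj : Function.Injective (fun p : Int × Int =>
      (p.1 - (PySem.List.min? (s.map (fun p => p.1)) (fun x => x)).getD 0,
       p.2 - (PySem.List.min? (s.map (fun p => p.2)) (fun x => x)).getD 0)) := by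
    rintro ⟨a, b⟩ ⟨c, d⟩ hpq
    simp only [Prod.mk.injEq] at hpq ⊢
    omega
  have hnorm : pvNormalize s = s.map (fun p : Int × Int =>
      (p.1 - (PySem.List.min? (s.map (fun p => p.1)) (fun x => x)).getD 0,
       p.2 - (PySem.List.min? (s.map (fun p => p.2)) (fun x => x)).getD 0)) := by
    unfold pvNormalize
    rw [if_neg hne]
    exact PySem.Set.ofList_eq_self_of_nodup _ (hnd.map finj)
  rw [hnorm]
  set mx := (PySem.List.min? (s.map (fun p => p.1)) (fun x => x)).getD 0 with hmx
  set my := (PySem.List.min? (s.map (fun p => p.2)) (fun x => x)).getD 0 with hmy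
  set m := s.map (fun p : Int × Int => (p.1 - mx, p.2 - my)) with hm
  have hmne : m ≠ [] := by
    rw [hm]; intro hx; exact hne (List.map_eq_nil_iff.mp hx)
  obtain ⟨hwx_le, hwx_mem⟩ :=
    pv_extrema_max (m.map (fun p => p.1)) (-1) (by intro hx; exact hmne (List.map_eq_nil_iff.mp hx))
  obtain ⟨hwy_le, hwy_mem⟩ :=
    pv_extrema_max (m.map (fun p => p.2)) (-1) (by intro hx; exact hmne (List.map_eq_nil_iff.mp hx))
  refine ⟨hmne, hnd.map finj, ?_, ?_, ?_, ?_, ?_⟩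
  · intro p hp
    refine ⟨?_, ?_, ?_, ?_⟩
    · obtain ⟨q, hq, rfl⟩ := List.mem_map.mp hp
      have := hmx_le q.1 (List.mem_map.mpr ⟨q, hq, rfl⟩)
      dsimp only
      omega
    · have := hwx_le p.1 (List.mem_map.mpr ⟨p, hp, rfl⟩); omega
    · obtain ⟨q, hq, rfl⟩ := List.mem_map.mp hp
      have := hmy_le q.2 (List.mem_map.mpr ⟨q, hq, rfl⟩)
      dsimp only
      omega
    · have := hwy_le p.2 (List.mem_map.mpr ⟨p, hp, rfl⟩); omega
  · obtain ⟨q, hq, hq1⟩ := List.mem_map.mp hmx_mem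
    exact ⟨(q.1 - mx, q.2 - my), List.mem_map.mpr ⟨q, hq, rfl⟩, by dsimp only; omega⟩
  · obtain ⟨q, hq, hq1⟩ := List.mem_map.mp hmy_mem
    exact ⟨(q.1 - mx, q.2 - my), List.mem_map.mpr ⟨q, hq, rfl⟩, by dsimp only; omega⟩
  · obtain ⟨p, hp, hp1⟩ := List.mem_map.mp hwx_mem
    exact ⟨p, hp, by omega⟩
  · obtain ⟨p, hp, hp1⟩ := List.mem_map.mp hwy_mem
    exact ⟨p, hp, by omega⟩

-- ===== VERDICT (by name: the statement is the Claim_ definition above) =====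
theorem dihedral_orientations_spec : Claim_equal_dihedral_orientations := by
  unfold Claim_equal_dihedral_orientations
  intro cells _
  unfold Spec_dihedral_orientations
  by_cases hc : PySem.Set.ofList cells = []
  · have hcells : cells = [] := by
      cases cells with
      | nil => rfl
      | cons c t =>
        have hmem : c ∈ PySem.Set.ofList (c :: t) := (PySem.Set.mem_ofList _ _).mpr (by simp)
        rw [hc] at hmem
        simp at hmem
    subst hcells
    decide
  · have hnd : (PySem.Set.ofList cells).Nodup := PySem.Set.nodup_ofList cells
    set s := PySem.Set.ofList cells with hs
    -- name the pieces B computes (all definitionally equal to their raw terms)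
    set mx := (PySem.List.min? (s.map (fun p => p.1)) (fun x => x)).getD 0 with hmx
    set my := (PySem.List.min? (s.map (fun p => p.2)) (fun x => x)).getD 0 with hmy
    set nb := PySem.Set.ofList (s.map (fun p => (p.1 - mx, p.2 - my))) with hnb
    set w := (PySem.List.max? (nb.map (fun p => p.1)) (fun x => x)).getD (-1) + 1 with hw
    set h := (PySem.List.max? (nb.map (fun p => p.2)) (fun x => x)).getD (-1) + 1 with hh
    have hnorm : pvNormalize s = nb := by
      unfold pvNormalize
      rw [if_neg hc]
    have hNF : pvNF nb w h := by
      have := pvNormalize_NF s hc hnd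
      rw [hnorm] at this
      exact this
    have hnd_nb : nb.Nodup := hNF.2.1
    -- both ports in explicit 8-variant form
    have hA : dihedral_orientations cells =
        PySem.Dict.values (([pvNormalize s, pvReflectX (pvNormalize s),
          pvRotate90 (pvNormalize s), pvReflectX (pvRotate90 (pvNormalize s)),
          pvRotate90 (pvRotate90 (pvNormalize s)),
          pvReflectX (pvRotate90 (pvRotate90 (pvNormalize s))),
          pvRotate90 (pvRotate90 (pvRotate90 (pvNormalize s))),
          pvReflectX (pvRotate90 (pvRotate90 (pvRotate90 (pvNormalize s))))]).foldl
          pvUniqStep PySem.Dict.empty) := rfl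
    have hB : dihedral_orientations_alt cells =
        PySem.Dict.values (([ fun p : Int × Int => (p.1, p.2),
            fun p : Int × Int => (w - 1 - p.1, p.2),
            fun p : Int × Int => (p.2, w - 1 - p.1),
            fun p : Int × Int => (h - 1 - p.2, w - 1 - p.1),
            fun p : Int × Int => (w - 1 - p.1, h - 1 - p.2),
            fun p : Int × Int => (p.1, h - 1 - p.2),
            fun p : Int × Int => (h - 1 - p.2, p.1),
            fun p : Int × Int => (p.2, p.1) ]).foldl
          (fun d t => pvUniqStep d (PySem.Set.ofList (nb.map t))) PySem.Dict.empty) := by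
      unfold dihedral_orientations_alt
      rw [← hs]
      simp only [if_neg hc]
      rfl
    -- the rotation/reflection chain in closed map form
    have e2 := pvReflectX_of_NF nb w h hNF
    have e3 := pvRotate90_of_NF nb w h hNF
    have hNF1 := pvRotNF nb w h hNF
    have e4 := pvReflectX_of_NF _ h w hNF1
    have e5 := pvRotate90_of_NF _ h w hNF1
    have hNF2 := pvRotNF _ h w hNF1
    have e6 := pvReflectX_of_NF _ w h hNF2
    have e7 := pvRotate90_of_NF _ w h hNF2
    have hNF3 := pvRotNF _ w h hNF2
    have e8 := pvReflectX_of_NF _ h w hNF3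
    -- each of B's eight variants is the corresponding A variant, as the same list
    have i1 : Function.Injective (fun p : Int × Int => ((p.1, p.2) : Int × Int)) := by
      rintro ⟨a, b⟩ ⟨c, d⟩ hpq; simpa using hpq
    have i4 : Function.Injective (fun p : Int × Int => ((h - 1 - p.2, w - 1 - p.1) : Int × Int)) := by
      rintro ⟨a, b⟩ ⟨c, d⟩ hpq; simp only [Prod.mk.injEq] at hpq ⊢; omega
    have i5 : Function.Injective (fun p : Int × Int => ((w - 1 - p.1, h - 1 - p.2) : Int × Int)) := by
      rintro ⟨a, b⟩ ⟨c, d⟩ hpq; simp only [Prod.mk.injEq] at hpq ⊢; omega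
    have i6 : Function.Injective (fun p : Int × Int => ((p.1, h - 1 - p.2) : Int × Int)) := by
      rintro ⟨a, b⟩ ⟨c, d⟩ hpq; simp only [Prod.mk.injEq] at hpq ⊢; omega
    have i7 : Function.Injective (fun p : Int × Int => ((h - 1 - p.2, p.1) : Int × Int)) := by
      rintro ⟨a, b⟩ ⟨c, d⟩ hpq; simp only [Prod.mk.injEq] at hpq ⊢; omega
    have i8 : Function.Injective (fun p : Int × Int => ((p.2, p.1) : Int × Int)) := by
      rintro ⟨a, b⟩ ⟨c, d⟩ hpq; simp only [Prod.mk.injEq] at hpq ⊢; omega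
    have c1 : PySem.Set.ofList (nb.map (fun p : Int × Int => (p.1, p.2))) = nb := by
      have : nb.map (fun p : Int × Int => (p.1, p.2)) = nb := by simp
      rw [this]
      exact PySem.Set.ofList_eq_self_of_nodup _ hnd_nb
    have c2 : PySem.Set.ofList (nb.map (fun p : Int × Int => (w - 1 - p.1, p.2))) =
        nb.map (fun p : Int × Int => (w - 1 - p.1, p.2)) :=
      PySem.Set.ofList_eq_self_of_nodup _ (hnd_nb.map (pvRefl_inj w))
    have c3 : PySem.Set.ofList (nb.map (fun p : Int × Int => (p.2, w - 1 - p.1))) =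
        nb.map (fun p : Int × Int => (p.2, w - 1 - p.1)) :=
      PySem.Set.ofList_eq_self_of_nodup _ (hnd_nb.map (pvRot_inj w))
    have c4 : PySem.Set.ofList (nb.map (fun p : Int × Int => (h - 1 - p.2, w - 1 - p.1))) =
        (nb.map (fun p : Int × Int => (p.2, w - 1 - p.1))).map
          (fun p : Int × Int => (h - 1 - p.1, p.2)) := by
      rw [List.map_map]
      have : nb.map ((fun p : Int × Int => ((h - 1 - p.1, p.2) : Int × Int)) ∘
          (fun p : Int × Int => (p.2, w - 1 - p.1))) =
          nb.map (fun p : Int × Int => (h - 1 - p.2, w - 1 - p.1)) := by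
        refine List.map_congr_left (fun p _ => ?_)
        simp only [Function.comp_apply]
      rw [this]
      exact PySem.Set.ofList_eq_self_of_nodup _ (hnd_nb.map i4)
    have c5 : PySem.Set.ofList (nb.map (fun p : Int × Int => (w - 1 - p.1, h - 1 - p.2))) =
        (nb.map (fun p : Int × Int => (p.2, w - 1 - p.1))).map
          (fun p : Int × Int => (p.2, h - 1 - p.1)) := by
      rw [List.map_map]
      have : nb.map ((fun p : Int × Int => ((p.2, h - 1 - p.1) : Int × Int)) ∘
          (fun p : Int × Int => (p.2, w - 1 - p.1))) =
          nb.map (fun p : Int × Int => (w - 1 - p.1, h - 1 - p.2)) := by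
        refine List.map_congr_left (fun p _ => ?_)
        simp only [Function.comp_apply]
      rw [this]
      exact PySem.Set.ofList_eq_self_of_nodup _ (hnd_nb.map i5)
    have c6 : PySem.Set.ofList (nb.map (fun p : Int × Int => (p.1, h - 1 - p.2))) =
        ((nb.map (fun p : Int × Int => (p.2, w - 1 - p.1))).map
          (fun p : Int × Int => (p.2, h - 1 - p.1))).map
          (fun p : Int × Int => (w - 1 - p.1, p.2)) := by
      rw [List.map_map, List.map_map]
      have : nb.map (((fun p : Int × Int => ((w - 1 - p.1, p.2) : Int × Int)) ∘
          (fun p : Int × Int => ((p.2, h - 1 - p.1) : Int × Int))) ∘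
           (fun p : Int × Int => (p.2, w - 1 - p.1))) =
          nb.map (fun p : Int × Int => (p.1, h - 1 - p.2)) := by
        refine List.map_congr_left (fun p _ => ?_)
        simp only [Function.comp_apply, Prod.mk.injEq, and_true]
        omega
      rw [this]
      exact PySem.Set.ofList_eq_self_of_nodup _ (hnd_nb.map i6)
    have c7 : PySem.Set.ofList (nb.map (fun p : Int × Int => (h - 1 - p.2, p.1))) =
        ((nb.map (fun p : Int × Int => (p.2, w - 1 - p.1))).map
          (fun p : Int × Int => (p.2, h - 1 - p.1))).map
          (fun p : Int × Int => (p.2, w - 1 - p.1)) := by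
      rw [List.map_map, List.map_map]
      have : nb.map (((fun p : Int × Int => ((p.2, w - 1 - p.1) : Int × Int)) ∘
          (fun p : Int × Int => ((p.2, h - 1 - p.1) : Int × Int))) ∘
           (fun p : Int × Int => (p.2, w - 1 - p.1))) =
          nb.map (fun p : Int × Int => (h - 1 - p.2, p.1)) := by
        refine List.map_congr_left (fun p _ => ?_)
        simp only [Function.comp_apply, Prod.mk.injEq, true_and]
        omega
      rw [this]
      exact PySem.Set.ofList_eq_self_of_nodup _ (hnd_nb.map i7)
    have c8 : PySem.Set.ofList (nb.map (fun p : Int × Int => (p.2, p.1))) =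
        (((nb.map (fun p : Int × Int => (p.2, w - 1 - p.1))).map
          (fun p : Int × Int => (p.2, h - 1 - p.1))).map
          (fun p : Int × Int => (p.2, w - 1 - p.1))).map
          (fun p : Int × Int => (h - 1 - p.1, p.2)) := by
      rw [List.map_map, List.map_map, List.map_map]
      have : nb.map ((((fun p : Int × Int => ((h - 1 - p.1, p.2) : Int × Int)) ∘
          (fun p : Int × Int => ((p.2, w - 1 - p.1) : Int × Int))) ∘
           (fun p : Int × Int => ((p.2, h - 1 - p.1) : Int × Int))) ∘
            (fun p : Int × Int => (p.2, w - 1 - p.1))) =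
          nb.map (fun p : Int × Int => (p.2, p.1)) := by
        refine List.map_congr_left (fun p _ => ?_)
        simp only [Function.comp_apply, Prod.mk.injEq]
        omega
      rw [this]
      exact PySem.Set.ofList_eq_self_of_nodup _ (hnd_nb.map i8)
    rw [hA, hB, hnorm, e3, e5, e7, e2, e4, e6, e8]
    simp only [List.foldl_cons, List.foldl_nil]
    rw [c1, c2, c3, c4, c5, c6, c7, c8]
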